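-- pv_equiv track=rewrite | github.com/PouceHeure/ros_detection_legs | src/ros_detection_legs/deep_learning/preprocessing/processing.py | keep_proportion
-- ===== SOURCE A (Python) =====
-- def keep_proportion(X,y):
--     number_y_to_1 = y.count(1)
--     new_X = []
--     new_y = []
--     number_y0_added = 0
--     for i in range(len(X)):
--         if(len(X[i]) < 30):
--             if(y[i] == 1 or (y[i] == 0 and number_y0_added < 6*number_y_to_1)):
--                 new_X.append(X[i])
--                 new_y.append(y[i])
--                 number_y0_added += 1-y[i]
--
--     return new_X,new_y
-- ===== SOURCE B (Python) =====
-- def keep_proportion(X, y):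
--     # Different decomposition: index lists + slice + sort instead of one stateful loop.
--     limit = 6 * y.count(1)
--     idx1 = [i for i in range(len(X)) if len(X[i]) < 30 and y[i] == 1]
--     idx0 = [i for i in range(len(X)) if len(X[i]) < 30 and y[i] == 0]
--     keep = sorted(idx1 + idx0[:limit])
--     return [X[i] for i in keep], [y[i] for i in keep]
-- ===== Notes on version B (the rewrite author's own statement) =====
-- stated objective: alternative
-- what changed: Replaces the single stateful loop with its running zero-counter by two filtered index lists, a slice keeping the first 6*count(1) zero indices, and a sort that merges them back into original order.
import Mathlib
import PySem

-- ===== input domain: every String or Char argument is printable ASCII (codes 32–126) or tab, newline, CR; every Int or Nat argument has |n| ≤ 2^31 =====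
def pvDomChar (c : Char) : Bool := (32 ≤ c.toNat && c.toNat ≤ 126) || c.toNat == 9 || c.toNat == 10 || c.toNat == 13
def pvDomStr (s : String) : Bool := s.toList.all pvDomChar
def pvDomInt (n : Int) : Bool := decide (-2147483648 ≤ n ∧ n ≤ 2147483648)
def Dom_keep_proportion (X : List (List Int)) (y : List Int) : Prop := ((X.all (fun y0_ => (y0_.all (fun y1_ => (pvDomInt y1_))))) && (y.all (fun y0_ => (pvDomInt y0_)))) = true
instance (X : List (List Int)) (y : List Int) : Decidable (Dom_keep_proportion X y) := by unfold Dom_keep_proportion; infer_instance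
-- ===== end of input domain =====

-- B replaces A's single stateful loop (running zero-counter) by filtered index lists, a slice and
-- a sort restoring original order; objective: alternative decomposition (not faster).

-- ===== PORT A =====
-- one loop step of A, on state (new_X, new_y, number_y0_added)
def stepA (X : List (List Int)) (y : List Int) (numY1 : Int)
    (s : List (List Int) × List Int × Int) (i : Int) : List (List Int) × List Int × Int :=
  if (PySem.List.pyGetD X i []).length < 30 then
    if PySem.List.pyGetD y i 0 = 1 ∨ (PySem.List.pyGetD y i 0 = 0 ∧ s.2.2 < 6 * numY1) then
      (s.1 ++ [PySem.List.pyGetD X i []], s.2.1 ++ [PySem.List.pyGetD y i 0],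
       s.2.2 + (1 - PySem.List.pyGetD y i 0))
    else s
  else s

def keep_proportion (X : List (List Int)) (y : List Int) : List (List Int) × List Int :=
  let numY1 : Int := (PySem.List.count y 1 : Int)
  let st := (PySem.List.pyRange 0 X.length 1).foldl (stepA X y numY1) ([], [], 0)
  (st.1, st.2.1)

-- ===== PORT B =====
def keep_proportion_alt (X : List (List Int)) (y : List Int) : List (List Int) × List Int :=
  let limit : Int := 6 * (PySem.List.count y 1 : Int)
  let idx1 := (PySem.List.pyRange 0 X.length 1).filter
    (fun i => decide ((PySem.List.pyGetD X i []).length < 30) && decide (PySem.List.pyGetD y i 0 = 1))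
  let idx0 := (PySem.List.pyRange 0 X.length 1).filter
    (fun i => decide ((PySem.List.pyGetD X i []).length < 30) && decide (PySem.List.pyGetD y i 0 = 0))
  let keep := PySem.List.sorted (idx1 ++ PySem.List.slice idx0 none (some limit)) (fun i => i) false
  (keep.map (fun i => PySem.List.pyGetD X i []), keep.map (fun i => PySem.List.pyGetD y i 0))

-- ===== PRECONDITION & SPEC =====
-- Pre_ excludes exactly the inputs where Python A raises IndexError: some row X[i] with i ≥ len(y)
-- has fewer than 30 elements, so y[i] is evaluated out of range (B raises there too).
def Pre_keep_proportion (X : List (List Int)) (y : List Int) : Prop :=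
  ∀ x ∈ X.drop y.length, 30 ≤ x.length
instance (X : List (List Int)) (y : List Int) : Decidable (Pre_keep_proportion X y) := by
  unfold Pre_keep_proportion; infer_instance
def pvWitness_keep_proportion : List (List Int) × List Int := ([[1], [2, 2], [3]], [1, 0, 0])

def Spec_keep_proportion (X : List (List Int)) (y : List Int) (out : List (List Int) × List Int) : Prop := out = keep_proportion_alt X y
instance (X : List (List Int)) (y : List Int) (out : List (List Int) × List Int) : Decidable (Spec_keep_proportion X y out) := by unfold Spec_keep_proportion; infer_instance

-- ===== CLAIM (what is proved, stated in full; the proofs are below) =====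
def Claim_equal_keep_proportion : Prop := ∀ (X : List (List Int)) (y : List Int), Dom_keep_proportion X y → Pre_keep_proportion X y → Spec_keep_proportion X y (keep_proportion X y)

-- ===== LEMMAS AND PROOFS =====

-- the list of indices A keeps, as a recursion over the remaining index list with zero-counter z
def selIdx (X : List (List Int)) (y : List Int) (limit : Int) : List Int → Int → List Int
  | [], _ => []
  | i :: t, z =>
    if (PySem.List.pyGetD X i []).length < 30 then
      if PySem.List.pyGetD y i 0 = 1 then i :: selIdx X y limit t z
      else if PySem.List.pyGetD y i 0 = 0 ∧ z < limit then i :: selIdx X y limit t (z + 1)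
      else selIdx X y limit t z
    else selIdx X y limit t z

lemma foldA_eq_selIdx (X : List (List Int)) (y : List Int) (numY1 : Int) :
    ∀ (l : List Int) (K : List Int) (z : Int),
      ∃ z', (l.foldl (stepA X y numY1)
              (K.map (fun i => PySem.List.pyGetD X i []), K.map (fun i => PySem.List.pyGetD y i 0), z))
        = ((K ++ selIdx X y (6 * numY1) l z).map (fun i => PySem.List.pyGetD X i []),
           (K ++ selIdx X y (6 * numY1) l z).map (fun i => PySem.List.pyGetD y i 0), z') := by
  intro l
  induction l with
  | nil => intro K z; exact ⟨z, by simp [selIdx]⟩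
  | cons i t ih =>
    intro K z
    rw [List.foldl_cons]
    by_cases hs : (PySem.List.pyGetD X i []).length < 30
    · by_cases h1 : PySem.List.pyGetD y i 0 = 1
      · have hzz : z + (1 - PySem.List.pyGetD y i 0) = z := by rw [h1]; ring
        obtain ⟨z', hz'⟩ := ih (K ++ [i]) z
        refine ⟨z', ?_⟩
        simp only [stepA, selIdx]
        rw [if_pos hs, if_pos (Or.inl h1), if_pos hs, if_pos h1]
        simp only [hzz]
        simpa [List.map_append, List.append_assoc] using hz'
      · by_cases h0 : PySem.List.pyGetD y i 0 = 0 ∧ z < 6 * numY1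
        · have hzz : z + (1 - PySem.List.pyGetD y i 0) = z + 1 := by rw [h0.1]; ring
          obtain ⟨z', hz'⟩ := ih (K ++ [i]) (z + 1)
          refine ⟨z', ?_⟩
          simp only [stepA, selIdx]
          rw [if_pos hs, if_pos (Or.inr h0), if_pos hs, if_neg h1, if_pos h0]
          simp only [hzz]
          simpa [List.map_append, List.append_assoc] using hz'
        · obtain ⟨z', hz'⟩ := ih K z
          refine ⟨z', ?_⟩
          simp only [stepA, selIdx]
          rw [if_pos hs, if_neg (by tauto), if_pos hs, if_neg h1, if_neg h0]
          exact hz'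
    · obtain ⟨z', hz'⟩ := ih K z
      refine ⟨z', ?_⟩
      simp only [stepA, selIdx]
      rw [if_neg hs, if_neg hs]
      exact hz'

lemma selIdx_sublist (X : List (List Int)) (y : List Int) (limit : Int) :
    ∀ (l : List Int) (z : Int), (selIdx X y limit l z).Sublist l := by
  intro l
  induction l with
  | nil => intro z; simp [selIdx]
  | cons i t ih =>
    intro z
    simp only [selIdx]
    split_ifs with hs h1 h0
    · exact (ih z).cons₂ i
    · exact (ih (z + 1)).cons₂ i
    · exact (ih z).cons i
    · exact (ih z).cons i

lemma selIdx_perm (X : List (List Int)) (y : List Int) (limit : Int) :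
    ∀ (l : List Int) (z : Int),
      (selIdx X y limit l z).Perm
        ((l.filter (fun i => decide ((PySem.List.pyGetD X i []).length < 30) && decide (PySem.List.pyGetD y i 0 = 1)))
          ++ (l.filter (fun i => decide ((PySem.List.pyGetD X i []).length < 30) && decide (PySem.List.pyGetD y i 0 = 0))).take (limit - z).toNat) := by
  intro l
  induction l with
  | nil => intro z; simp [selIdx]
  | cons i t ih =>
    intro z
    by_cases hs : (PySem.List.pyGetD X i []).length < 30
    · by_cases h1 : PySem.List.pyGetD y i 0 = 1
      · have h0 : ¬ PySem.List.pyGetD y i 0 = 0 := by rw [h1]; decide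
        rw [List.filter_cons_of_pos (by simp [hs, h1]), List.filter_cons_of_neg (by simp [h0])]
        simp only [selIdx]
        rw [if_pos hs, if_pos h1]
        exact (ih z).cons i
      · by_cases h0 : PySem.List.pyGetD y i 0 = 0
        · rw [List.filter_cons_of_neg (by simp [h1]), List.filter_cons_of_pos (by simp [hs, h0])]
          simp only [selIdx]
          rw [if_pos hs, if_neg h1]
          by_cases hz : z < limit
          · rw [if_pos ⟨h0, hz⟩]
            have htn : (limit - z).toNat = (limit - (z + 1)).toNat + 1 := by omega
            rw [htn, List.take_succ_cons]
            exact ((ih (z + 1)).cons i).trans List.perm_middle.symm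
          · rw [if_neg (fun hc => hz hc.2)]
            have htn0 : (limit - z).toNat = 0 := by omega
            have h := ih z
            rw [htn0] at h ⊢
            simpa using h
        · rw [List.filter_cons_of_neg (by simp [h1]), List.filter_cons_of_neg (by simp [h0])]
          simp only [selIdx]
          rw [if_pos hs, if_neg h1, if_neg (fun hc => h0 hc.1)]
          exact ih z
    · rw [List.filter_cons_of_neg (by simp [hs]), List.filter_cons_of_neg (by simp [hs])]
      simp only [selIdx]
      rw [if_neg hs]
      exact ih z

lemma selIdx_pairwise (X : List (List Int)) (y : List Int) (limit : Int) (n z : Int) :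
    (selIdx X y limit (PySem.List.pyRange 0 n 1) z).Pairwise (· < ·) :=
  (PySem.List.pairwise_lt_pyRange_one 0 n).sublist (selIdx_sublist X y limit _ z)

-- ===== VERDICT (by name: the statement is the Claim_ definition above) =====
theorem keep_proportion_spec : Claim_equal_keep_proportion := by
  intro X y _ _
  unfold Spec_keep_proportion keep_proportion keep_proportion_alt
  dsimp only
  have hlim : (0:Int) ≤ 6 * (PySem.List.count y 1 : Int) := by positivity
  obtain ⟨z', hz'⟩ := foldA_eq_selIdx X y (PySem.List.count y 1 : Int)
    (PySem.List.pyRange 0 X.length 1) [] 0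
  simp only [List.map_nil, List.nil_append] at hz'
  rw [hz']
  have hperm := selIdx_perm X y (6 * (PySem.List.count y 1 : Int)) (PySem.List.pyRange 0 X.length 1) 0
  rw [sub_zero] at hperm
  rw [PySem.List.slice_to _ hlim]
  have hsorted := PySem.List.sorted_eq_of_perm_of_pairwise_lt _ _ (fun i : Int => i) hperm
    (selIdx_pairwise X y (6 * (PySem.List.count y 1 : Int)) X.length 0)
  refine Prod.ext ?_ ?_
  · exact (congrArg (List.map (fun i => PySem.List.pyGetD X i [])) hsorted).symm
  · exact (congrArg (List.map (fun i => PySem.List.pyGetD y i 0)) hsorted).symm
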